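-- pv_equiv track=rewrite | github.com/SharonBrizinov/wirecov | wirecov/optimize.py | _count_universe
-- ===== SOURCE A (Python) =====
-- from typing import Dict, List, Set, Tuple
--
-- def _count_universe(per_pcap: Dict[str, Dict[str, Set[int]]]) -> int:
--     """Count total unique lines across all pcaps."""
--     all_lines: Dict[str, Set[int]] = {}
--     for pcap_lines in per_pcap.values():
--         for source, lines in pcap_lines.items():
--             if source not in all_lines:
--                 all_lines[source] = set()
--             all_lines[source] |= lines
--     return sum(len(ls) for ls in all_lines.values())
-- ===== SOURCE B (Python) =====
-- from typing import Dict, List, Set, Tuple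
--
-- def _count_universe(per_pcap: Dict[str, Dict[str, Set[int]]]) -> int:
--     """Count total unique lines across all pcaps."""
--     pairs = [(source, line)
--              for pcap_lines in per_pcap.values()
--              for source, lines in pcap_lines.items()
--              for line in lines]
--     pairs.sort()
--     total = 0
--     prev = None
--     for p in pairs:
--         if p != prev:
--             total += 1
--             prev = p
--     return total
-- ===== Notes on version B (the rewrite author's own statement) =====
-- stated objective: alternative
-- what changed: Instead of bucketing lines into a dict of per-source union sets and summing their sizes, B flattens everything into one list of (source, line) pairs, sorts it, and counts distinct adjacent runs in a single scan.
import Mathlib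
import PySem

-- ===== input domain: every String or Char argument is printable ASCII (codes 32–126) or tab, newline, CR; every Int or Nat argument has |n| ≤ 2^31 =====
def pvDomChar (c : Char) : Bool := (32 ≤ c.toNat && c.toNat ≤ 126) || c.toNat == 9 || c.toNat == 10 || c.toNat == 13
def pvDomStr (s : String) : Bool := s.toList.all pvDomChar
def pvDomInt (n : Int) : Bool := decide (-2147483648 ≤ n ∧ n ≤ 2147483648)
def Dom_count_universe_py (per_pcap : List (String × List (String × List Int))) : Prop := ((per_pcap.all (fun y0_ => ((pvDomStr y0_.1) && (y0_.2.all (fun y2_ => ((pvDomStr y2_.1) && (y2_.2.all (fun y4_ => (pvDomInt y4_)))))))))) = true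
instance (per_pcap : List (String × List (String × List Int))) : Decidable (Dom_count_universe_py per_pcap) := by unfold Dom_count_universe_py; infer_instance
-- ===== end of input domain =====

-- B replaces A's dict of per-source union sets (summed at the end) by flattening all
-- (source, line) pairs into one list, sorting it, and counting adjacent-distinct runs
-- in a single scan: objective 'alternative' (sort-then-scan instead of hash bucketing).

-- ===== PORT A =====
-- one iteration of A's inner loop body over an item (source, lines)
def pvAStep (d : PySem.Dict String (PySem.Set Int)) (q : String × List Int) :
    PySem.Dict String (PySem.Set Int) :=
  let d1 := if d.contains q.1 then d else d.insert q.1 PySem.Set.empty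
  d1.insert q.1 (PySem.Set.union (d1.getD q.1 PySem.Set.empty) q.2)

def count_universe_py (per_pcap : List (String × List (String × List Int))) : Int :=
  let all_lines : PySem.Dict String (PySem.Set Int) :=
    per_pcap.foldl (fun d p => p.2.foldl pvAStep d) PySem.Dict.empty
  all_lines.values.foldl (fun acc ls => acc + PySem.Set.len ls) 0

-- ===== PORT B =====
def count_universe_py_alt (per_pcap : List (String × List (String × List Int))) : Int :=
  -- the flattening comprehension
  let pairs : List (String × Int) :=
    per_pcap.flatMap (fun p => p.2.flatMap (fun q => q.2.map (fun line => (q.1, line))))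
  -- pairs.sort()  (Python tuple order = lexicographic on the components)
  let ps := PySem.List.sorted2 pairs (fun x => x.1) (fun x => x.2)
  -- single scan counting runs of distinct values
  (ps.foldl (fun st p => if st.2 ≠ some p then (st.1 + 1, some p) else st)
    ((0 : Int), (none : Option (String × Int)))).1

-- ===== PRECONDITION & SPEC =====
def Spec_count_universe_py (per_pcap : List (String × List (String × List Int))) (out : Int) : Prop := out = count_universe_py_alt per_pcap
instance (per_pcap : List (String × List (String × List Int))) (out : Int) : Decidable (Spec_count_universe_py per_pcap out) := by unfold Spec_count_universe_py; infer_instance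

-- ===== CLAIM (what is proved, stated in full; the proofs are below) =====
def Claim_equal_count_universe_py : Prop := ∀ (per_pcap : List (String × List (String × List Int))), Dom_count_universe_py per_pcap → Spec_count_universe_py per_pcap (count_universe_py per_pcap)

-- ===== LEMMAS AND PROOFS =====

-- proof-side helper: fold Set.add of (k, line) pairs, used to bridge both programs
def pvBStep (s : PySem.Set (String × Int)) (q : String × List Int) :
    PySem.Set (String × Int) :=
  q.2.foldl (fun s line => PySem.Set.add s (q.1, line)) s

-- The loop invariant: A's dict d and the flat set s describe the same (source, line)
-- pairs, with well-formedness, and A's eventual sum equals s's length.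
def pvInv (d : PySem.Dict String (PySem.Set Int)) (s : PySem.Set (String × Int)) : Prop :=
  d.keys.Nodup ∧ (∀ v ∈ d.values, v.Nodup) ∧ s.Nodup ∧
  (∀ k line, line ∈ d.getD k PySem.Set.empty ↔ (k, line) ∈ s) ∧
  (d.values.map List.length).sum = s.length

lemma pvInv_empty : pvInv PySem.Dict.empty PySem.Set.empty := by
  refine ⟨?_, ?_, ?_, ?_, ?_⟩ <;>
    simp [PySem.Dict.empty, PySem.Dict.keys, PySem.Dict.values, PySem.Dict.getD,
      PySem.Dict.get?, PySem.Set.empty]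

lemma pv_getD_nodup (d : PySem.Dict String (PySem.Set Int)) (k : String) (hv : ∀ v ∈ d.values, v.Nodup) :
    (d.getD k PySem.Set.empty).Nodup := by
  rcases hg : d.get? k with _ | v
  · rw [PySem.Dict.getD_of_get?_eq_none d PySem.Set.empty hg]; exact List.nodup_nil
  · rw [PySem.Dict.getD_of_get?_eq_some d PySem.Set.empty hg]
    apply hv
    have := PySem.Dict.mem_items_of_get?_eq_some d hg
    simpa [PySem.Dict.values] using List.mem_map_of_mem (f := Prod.snd) this

-- sum over a map that differs from another map only at one key of a nodup list
lemma pv_sum_map_single {α : Type} [DecidableEq α] (l : List α) (hl : l.Nodup) (k : α)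
    (hk : k ∈ l) (f g : α → Nat) (h : ∀ x ∈ l, x ≠ k → f x = g x) :
    (l.map f).sum + g k = (l.map g).sum + f k := by
  induction l with
  | nil => cases hk
  | cons a t ih =>
    rcases List.nodup_cons.mp hl with ⟨ha, ht⟩
    by_cases hak : a = k
    · subst hak
      have : t.map f = t.map g := List.map_congr_left (fun x hx => h x (by simp [hx])
        (fun hxk => ha (hxk ▸ hx)))
      simp [this]; omega
    · have hkt : k ∈ t := by rcases List.mem_cons.mp hk with h' | h'; exact absurd h'.symm hak; exact h'
      have := ih ht hkt (fun x hx hxk => h x (List.mem_cons_of_mem _ hx) hxk)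
      have hfa : f a = g a := h a (by simp) hak
      simp [hfa]; omega

lemma pv_step_single (d : PySem.Dict String (PySem.Set Int)) (s : PySem.Set (String × Int))
    (k : String) (line : Int) (h : pvInv d s) :
    pvInv (d.insert k (PySem.Set.add (d.getD k PySem.Set.empty) line))
      (PySem.Set.add s (k, line)) := by
  obtain ⟨hkeys, hvals, hs, hiff, hsum⟩ := h
  have hvnd : (d.getD k PySem.Set.empty).Nodup := pv_getD_nodup d k hvals
  refine ⟨PySem.Dict.nodup_keys_insert _ _ _ hkeys, ?_, PySem.Set.nodup_add _ _ hs, ?_, ?_⟩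
  · intro v hv
    rcases PySem.Dict.mem_values_insert _ _ _ _ hv with rfl | hv'
    · exact PySem.Set.nodup_add _ _ hvnd
    · exact hvals v hv'
  · intro k' line'
    rw [PySem.Dict.getD_insert]
    by_cases hk' : k' = k
    · subst hk'
      rw [if_pos rfl]
      simp only [PySem.Set.mem_add, hiff, Prod.mk.injEq]
      tauto
    · rw [if_neg hk']
      simp only [PySem.Set.mem_add, hiff, Prod.mk.injEq]
      tauto
  · -- the sums
    have hlen' : (PySem.Set.add (d.getD k PySem.Set.empty) line).length =
        (d.getD k PySem.Set.empty).length + (if line ∈ d.getD k PySem.Set.empty then 0 else 1) := by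
      rw [PySem.Set.add_eq_ite]; split_ifs <;> simp
    have hslen : (PySem.Set.add s (k, line)).length =
        s.length + (if (k, line) ∈ s then 0 else 1) := by
      rw [PySem.Set.add_eq_ite]; split_ifs <;> simp
    have hmem : line ∈ d.getD k PySem.Set.empty ↔ (k, line) ∈ s := hiff k line
    have hnd' : (d.insert k (PySem.Set.add (d.getD k PySem.Set.empty) line)).keys.Nodup :=
      PySem.Dict.nodup_keys_insert _ _ _ hkeys
    by_cases hc : d.contains k
    · -- existing key: keys unchanged, one value replaced
      have hkmem : k ∈ d.keys := (PySem.Dict.contains_iff_mem_keys d k).mp hc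
      rw [PySem.Dict.values_eq_map_keys _ hnd' PySem.Set.empty,
        PySem.Dict.keys_insert_of_contains d _ hc]
      rw [PySem.Dict.values_eq_map_keys d hkeys PySem.Set.empty] at hsum
      simp only [List.map_map, Function.comp_def] at hsum ⊢
      have key := pv_sum_map_single d.keys hkeys k hkmem
        (fun x => ((d.insert k (PySem.Set.add (d.getD k PySem.Set.empty) line)).getD x
          PySem.Set.empty).length)
        (fun x => (d.getD x PySem.Set.empty).length)
        (fun x _ hxk => by simp only [PySem.Dict.getD_insert, if_neg hxk])
      simp only [PySem.Dict.getD_insert_self] at key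
      rw [hslen]
      rw [hlen'] at key
      by_cases hm : line ∈ d.getD k PySem.Set.empty
      · rw [if_pos hm] at key; rw [if_pos (hmem.mp hm)]; omega
      · rw [if_neg hm] at key; rw [if_neg (fun hx => hm (hmem.mpr hx))]; omega
    · -- fresh key: appended value of length 1, and (k,line) ∉ s
      have hgd : d.getD k PySem.Set.empty = PySem.Set.empty :=
        PySem.Dict.getD_of_not_contains d PySem.Set.empty (by simpa using hc)
      have hns : (k, line) ∉ s := fun hx => by
        have h' := (hiff k line).mpr hx
        rw [hgd] at h'
        simp [PySem.Set.empty] at h'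
      have hknot : k ∉ d.keys := fun hx =>
        hc ((PySem.Dict.contains_iff_mem_keys d k).mpr hx)
      rw [PySem.Dict.values_eq_map_keys _ hnd' PySem.Set.empty,
        PySem.Dict.keys_insert_of_not_contains d _ (by simpa using hc)]
      rw [PySem.Dict.values_eq_map_keys d hkeys PySem.Set.empty] at hsum
      simp only [List.map_append, List.map_map, Function.comp_def, List.map_cons, List.map_nil,
        List.sum_append, List.sum_cons, List.sum_nil] at hsum ⊢
      have hcongr : d.keys.map (fun x => ((d.insert k (PySem.Set.add (d.getD k PySem.Set.empty)
            line)).getD x PySem.Set.empty).length)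
          = d.keys.map (fun x => (d.getD x PySem.Set.empty).length) :=
        List.map_congr_left (fun x hx => by
          rw [PySem.Dict.getD_insert, if_neg (fun h : x = k => hknot (h ▸ hx))])
      rw [hcongr, PySem.Dict.getD_insert_self, hslen, if_neg hns, hlen', hgd]
      have hE : (PySem.Set.empty : PySem.Set Int).length = 0 := rfl
      have hnm : line ∉ (PySem.Set.empty : PySem.Set Int) := by simp [PySem.Set.empty]
      rw [hE, if_neg hnm]
      omega

lemma pv_step_refresh (d : PySem.Dict String (PySem.Set Int)) (s : PySem.Set (String × Int))
    (k : String) (h : pvInv d s) :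
    pvInv (d.insert k (d.getD k PySem.Set.empty)) s := by
  obtain ⟨hkeys, hvals, hs, hiff, hsum⟩ := h
  have hvnd : (d.getD k PySem.Set.empty).Nodup := pv_getD_nodup d k hvals
  have hgd : ∀ k', (d.insert k (d.getD k PySem.Set.empty)).getD k' PySem.Set.empty =
      d.getD k' PySem.Set.empty := by
    intro k'
    rw [PySem.Dict.getD_insert]
    split_ifs with hk'
    · rw [hk']
    · rfl
  refine ⟨PySem.Dict.nodup_keys_insert _ _ _ hkeys, ?_, hs, ?_, ?_⟩
  · intro v hv
    rcases PySem.Dict.mem_values_insert _ _ _ _ hv with rfl | hv'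
    · exact hvnd
    · exact hvals v hv'
  · intro k' line'; rw [hgd]; exact hiff k' line'
  · have hnd' : (d.insert k (d.getD k PySem.Set.empty)).keys.Nodup :=
      PySem.Dict.nodup_keys_insert _ _ _ hkeys
    rw [PySem.Dict.values_eq_map_keys _ hnd' PySem.Set.empty]
    rw [PySem.Dict.values_eq_map_keys d hkeys PySem.Set.empty] at hsum
    by_cases hc : d.contains k
    · rw [PySem.Dict.keys_insert_of_contains d _ hc]
      simp only [List.map_map, Function.comp_def] at hsum ⊢
      rw [List.map_congr_left (fun x (_ : x ∈ d.keys) => by rw [hgd x])]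
      exact hsum
    · have hgdE : d.getD k PySem.Set.empty = PySem.Set.empty :=
        PySem.Dict.getD_of_not_contains d PySem.Set.empty (by simpa using hc)
      rw [PySem.Dict.keys_insert_of_not_contains d _ (by simpa using hc)]
      simp only [List.map_append, List.map_map, Function.comp_def, List.map_cons, List.map_nil,
        List.sum_append, List.sum_cons, List.sum_nil] at hsum ⊢
      rw [List.map_congr_left (fun x (_ : x ∈ d.keys) => by rw [hgd x]), hgd k, hgdE]
      have hE : (PySem.Set.empty : PySem.Set Int).length = 0 := rfl
      rw [hE]
      omega

-- A's whole (source, lines) step collapses to one insert of a foldl-built set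
lemma pvAStep_eq (d : PySem.Dict String (PySem.Set Int)) (q : String × List Int) :
    pvAStep d q = d.insert q.1 (q.2.foldl PySem.Set.add (d.getD q.1 PySem.Set.empty)) := by
  unfold pvAStep
  by_cases hc : d.contains q.1
  · simp only [hc, if_true]
    rfl
  · simp only [Bool.not_eq_true] at hc
    simp only [hc, Bool.false_eq_true, if_false]
    rw [PySem.Dict.insert_insert_self, PySem.Dict.getD_insert_self,
      PySem.Dict.getD_of_not_contains d PySem.Set.empty hc]
    rfl

lemma pv_step_lines (lines : List Int) (d : PySem.Dict String (PySem.Set Int))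
    (s : PySem.Set (String × Int)) (k : String) (h : pvInv d s) :
    pvInv (d.insert k (lines.foldl PySem.Set.add (d.getD k PySem.Set.empty)))
      (lines.foldl (fun s l => PySem.Set.add s (k, l)) s) := by
  induction lines generalizing d s with
  | nil => exact pv_step_refresh d s k h
  | cons l rest ih =>
    simp only [List.foldl_cons]
    have := ih (d.insert k (PySem.Set.add (d.getD k PySem.Set.empty) l))
      (PySem.Set.add s (k, l)) (pv_step_single d s k l h)
    rwa [PySem.Dict.insert_insert_self, PySem.Dict.getD_insert_self] at this

lemma pv_step (d : PySem.Dict String (PySem.Set Int)) (s : PySem.Set (String × Int))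
    (q : String × List Int) (h : pvInv d s) : pvInv (pvAStep d q) (pvBStep s q) := by
  rw [pvAStep_eq]
  exact pv_step_lines q.2 d s q.1 h

lemma pv_inner (l : List (String × List Int)) (d : PySem.Dict String (PySem.Set Int))
    (s : PySem.Set (String × Int)) (h : pvInv d s) :
    pvInv (l.foldl pvAStep d) (l.foldl pvBStep s) := by
  induction l generalizing d s with
  | nil => exact h
  | cons q t ih => exact ih _ _ (pv_step d s q h)

lemma pv_outer (l : List (String × List (String × List Int)))
    (d : PySem.Dict String (PySem.Set Int)) (s : PySem.Set (String × Int)) (h : pvInv d s) :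
    pvInv (l.foldl (fun d p => p.2.foldl pvAStep d) d)
      (l.foldl (fun s p => p.2.foldl pvBStep s) s) := by
  induction l generalizing d s with
  | nil => exact h
  | cons p t ih => exact ih _ _ (pv_inner p.2 d s h)

lemma pv_foldl_len (l : List (PySem.Set Int)) (acc : Int) :
    l.foldl (fun acc ls => acc + PySem.Set.len ls) acc = acc + ((l.map List.length).sum : Nat) := by
  induction l generalizing acc with
  | nil => simp
  | cons v t ih =>
    simp only [List.foldl_cons, List.map_cons, List.sum_cons, ih]
    simp [PySem.Set.len]
    ring

-- the fold-built flat set IS set(pairs) of the flattened pair list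
lemma pv_s_eq (l : List (String × List (String × List Int))) (s : PySem.Set (String × Int)) :
    l.foldl (fun s p => p.2.foldl pvBStep s) s =
      (l.flatMap (fun p => p.2.flatMap (fun q => q.2.map (fun line => (q.1, line))))).foldl
        PySem.Set.add s := by
  rw [List.foldl_flatMap]
  congr 1
  funext s' p
  rw [List.foldl_flatMap]
  congr 1
  funext s'' q
  rw [List.foldl_map]
  rfl

-- ---------- the lexicographic order Python's tuple sort uses ----------

def pvLexLe (a b : String × Int) : Prop := a.1 < b.1 ∨ (a.1 = b.1 ∧ a.2 ≤ b.2)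

def pvLt (a b : String × Int) : Bool :=
  decide (a.1 < b.1) || (!decide (b.1 < a.1) && decide (a.2 < b.2))

lemma pvLt_false_iff (a b : String × Int) : pvLt b a = false ↔ pvLexLe a b := by
  unfold pvLt pvLexLe
  rcases lt_trichotomy a.1 b.1 with h | h | h
  · simp [h, not_lt_of_gt h]
  · simp [h, not_lt]
  · simp [h, not_lt_of_gt h, (ne_of_gt h : a.1 ≠ b.1)]

lemma pvLt_true_le (a b : String × Int) (h : pvLt a b = true) : pvLexLe a b := by
  unfold pvLt at h
  unfold pvLexLe
  rcases lt_trichotomy a.1 b.1 with h1 | h1 | h1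
  · exact Or.inl h1
  · simp [h1] at h
    exact Or.inr ⟨h1, le_of_lt h⟩
  · simp [not_lt_of_gt h1, h1] at h

lemma pvLexLe_trans (a b c : String × Int) (h1 : pvLexLe a b) (h2 : pvLexLe b c) :
    pvLexLe a c := by
  unfold pvLexLe at *
  rcases h1 with h1 | ⟨h1, h1'⟩ <;> rcases h2 with h2 | ⟨h2, h2'⟩
  · exact Or.inl (lt_trans h1 h2)
  · exact Or.inl (h2 ▸ h1)
  · exact Or.inl (h1 ▸ h2)
  · exact Or.inr ⟨h1.trans h2, le_trans h1' h2'⟩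

lemma pvLexLe_antisymm (a b : String × Int) (h1 : pvLexLe a b) (h2 : pvLexLe b a) :
    a = b := by
  unfold pvLexLe at *
  rcases h1 with h1 | ⟨h1, h1'⟩
  · rcases h2 with h2 | ⟨h2, -⟩
    · exact absurd h1 (not_lt_of_gt h2)
    · exact absurd h1 (h2 ▸ lt_irrefl _)
  · rcases h2 with h2 | ⟨-, h2'⟩
    · exact absurd h2 (h1 ▸ lt_irrefl _)
    · exact Prod.ext h1 (le_antisymm h1' h2')

lemma pv_insertBy_pairwise (x : String × Int) (l : List (String × Int))
    (h : l.Pairwise pvLexLe) : (PySem.List.insertBy pvLt x l).Pairwise pvLexLe := by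
  induction l with
  | nil => simp [PySem.List.insertBy]
  | cons y ys ih =>
    rcases List.pairwise_cons.mp h with ⟨hy, hys⟩
    by_cases hb : pvLt x y = true
    · rw [show PySem.List.insertBy pvLt x (y :: ys) = x :: y :: ys by
        simp [PySem.List.insertBy, hb]]
      refine List.pairwise_cons.mpr ⟨?_, h⟩
      intro z hz
      rcases List.mem_cons.mp hz with rfl | hz'
      · exact pvLt_true_le x z hb
      · exact pvLexLe_trans _ _ _ (pvLt_true_le x y hb) (hy z hz')
    · rw [show PySem.List.insertBy pvLt x (y :: ys) = y :: PySem.List.insertBy pvLt x ys by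
        simp [PySem.List.insertBy, hb]]
      refine List.pairwise_cons.mpr ⟨?_, ih hys⟩
      intro z hz
      rcases (PySem.List.mem_insertBy pvLt x z ys).mp hz with rfl | hz'
      · exact (pvLt_false_iff y z).mp (Bool.not_eq_true _ ▸ hb)
      · exact hy z hz'

lemma pv_sorted2_pairwise (xs : List (String × Int)) :
    (PySem.List.sorted2 xs (fun x => x.1) (fun x => x.2)).Pairwise pvLexLe := by
  rw [show PySem.List.sorted2 xs (fun x => x.1) (fun x => x.2) =
      xs.foldl (fun acc x => PySem.List.insertBy pvLt x acc) [] from rfl]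
  have H : ∀ (l : List (String × Int)) (acc : List (String × Int)), acc.Pairwise pvLexLe →
      (l.foldl (fun acc x => PySem.List.insertBy pvLt x acc) acc).Pairwise pvLexLe := by
    intro l
    induction l with
    | nil => exact fun acc h => h
    | cons x t ih => exact fun acc h => ih _ (pv_insertBy_pairwise x acc h)
  exact H xs [] List.Pairwise.nil

-- ---------- the adjacent-distinct scan counts distinct values on a sorted list ----------

lemma pv_scan_some (M : List (String × Int)) (c : Int) (p : String × Int)
    (hp : ∀ x ∈ M, pvLexLe p x) (h : M.Pairwise pvLexLe) :
    (M.foldl (fun st q => if st.2 ≠ some q then (st.1 + 1, some q) else st)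
      (c, some p)).1 = c + ((M.toFinset.erase p).card : Int) := by
  induction M generalizing c p with
  | nil => simp
  | cons a t ih =>
    rcases List.pairwise_cons.mp h with ⟨ha, ht⟩
    simp only [List.foldl_cons]
    by_cases hap : a = p
    · subst hap
      rw [if_neg (by simp)]
      rw [ih c a (fun x hx => ha x hx) ht]
      have he : (a :: t).toFinset.erase a = t.toFinset.erase a := by
        ext z
        simp only [List.toFinset_cons, Finset.mem_erase, Finset.mem_insert, List.mem_toFinset]
        tauto
      rw [he]
    · have hpa : pvLexLe p a := hp a (List.mem_cons_self ..)
      have hpt : p ∉ t := fun hx =>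
        hap (pvLexLe_antisymm a p (ha p hx) hpa)
      rw [if_pos (show (some p ≠ some a) by
        simp only [ne_eq, Option.some.injEq]
        exact fun hx => hap hx.symm)]
      rw [ih (c + 1) a (fun x hx => ha x hx) ht]
      have hpn : p ∉ (a :: t).toFinset := by
        simp only [List.toFinset_cons, Finset.mem_insert, List.mem_toFinset]
        rintro (rfl | hx)
        · exact hap rfl
        · exact hpt hx
      rw [Finset.erase_eq_self.mpr hpn]
      have hins : (a :: t).toFinset = insert a (t.toFinset.erase a) := by
        ext z
        simp only [List.toFinset_cons, Finset.mem_insert, Finset.mem_erase, List.mem_toFinset]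
        by_cases hz : z = a <;> simp [hz]
      rw [hins, Finset.card_insert_of_notMem (Finset.notMem_erase a _)]
      push_cast
      ring

lemma pv_scan_none (M : List (String × Int)) (h : M.Pairwise pvLexLe) :
    (M.foldl (fun st q => if st.2 ≠ some q then (st.1 + 1, some q) else st)
      ((0 : Int), (none : Option (String × Int)))).1 = (M.toFinset.card : Int) := by
  cases M with
  | nil => simp
  | cons a t =>
    rcases List.pairwise_cons.mp h with ⟨ha, ht⟩
    have h1 : (a :: t).foldl (fun st q => if st.2 ≠ some q then (st.1 + 1, some q) else st)
        ((0 : Int), (none : Option (String × Int)))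
        = t.foldl (fun st q => if st.2 ≠ some q then (st.1 + 1, some q) else st)
          ((0 : Int) + 1, some a) := rfl
    rw [h1, pv_scan_some t (0 + 1) a ha ht]
    have hins : (a :: t).toFinset = insert a (t.toFinset.erase a) := by
      ext z
      simp only [List.toFinset_cons, Finset.mem_insert, Finset.mem_erase, List.mem_toFinset]
      by_cases hz : z = a <;> simp [hz]
    rw [hins, Finset.card_insert_of_notMem (Finset.notMem_erase a _)]
    push_cast
    ring

-- the length of the fold-built set is the number of distinct pairs
lemma pv_set_len (L : List (String × Int)) :
    (L.foldl PySem.Set.add (PySem.Set.empty : PySem.Set (String × Int))).length =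
      L.toFinset.card := by
  rw [show (PySem.Set.empty : PySem.Set (String × Int)) = [] from rfl,
    ← PySem.Set.ofList_eq_foldl]
  have hnd : (PySem.Set.ofList L).Nodup := PySem.Set.nodup_ofList L
  have hfin : (PySem.Set.ofList L).toFinset = L.toFinset := by
    ext z
    simp only [List.mem_toFinset]
    exact PySem.Set.mem_ofList L z
  rw [← List.toFinset_card_of_nodup hnd, hfin]

-- ===== VERDICT (by name: the statement is the Claim_ definition above) =====
theorem count_universe_py_spec : Claim_equal_count_universe_py := by
  intro per_pcap _
  unfold Spec_count_universe_py
  have hA0 : count_universe_py per_pcap =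
      (per_pcap.foldl (fun d p => p.2.foldl pvAStep d) PySem.Dict.empty).values.foldl
        (fun acc ls => acc + PySem.Set.len ls) 0 := rfl
  have hB0 : count_universe_py_alt per_pcap =
      ((PySem.List.sorted2
          (per_pcap.flatMap (fun p => p.2.flatMap (fun q => q.2.map (fun line => (q.1, line)))))
          (fun x => x.1) (fun x => x.2)).foldl
        (fun st p => if st.2 ≠ some p then (st.1 + 1, some p) else st)
        ((0 : Int), (none : Option (String × Int)))).1 := rfl
  obtain ⟨-, -, -, -, hsum⟩ :=
    pv_outer per_pcap PySem.Dict.empty PySem.Set.empty pvInv_empty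
  set L := per_pcap.flatMap (fun p => p.2.flatMap (fun q => q.2.map (fun line => (q.1, line))))
    with hL
  have hperm : (PySem.List.sorted2 L (fun x => x.1) (fun x => x.2)).toFinset = L.toFinset :=
    List.toFinset_eq_of_perm _ _ (PySem.List.sorted2_perm L (fun x => x.1) (fun x => x.2) false)
  rw [hA0, hB0, pv_foldl_len, hsum, pv_s_eq per_pcap PySem.Set.empty, ← hL, pv_set_len,
    pv_scan_none _ (pv_sorted2_pairwise _), hperm]
  ring
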